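-- pv_equiv track=rewrite | github.com/cymis/adagio-cli | src/adagio/qapi/build.py | normalize_plugin_selection
-- ===== SOURCE A (Python) =====
-- from collections.abc import Callable, Iterator, Mapping, Sequence
--
-- def normalize_plugin_selection(plugin_names: Sequence[str] | None) -> list[str] | None:
--     """Normalize repeated or comma-separated plugin names."""
--     if plugin_names is None:
--         return None
--
--     normalized: list[str] = []
--     for plugin_name in plugin_names:
--         for token in plugin_name.split(","):
--             stripped = token.strip()
--             if stripped:
--                 normalized.append(stripped)
--
--     return normalized
-- ===== SOURCE B (Python) =====
-- def normalize_plugin_selection(plugin_names):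
--     """Normalize repeated or comma-separated plugin names."""
--     if plugin_names is None:
--         return None
--     out = []
--     for name in plugin_names:
--         buf = ""   # stripped token collected so far
--         pend = ""  # internal whitespace not yet known to be internal
--         for ch in name:
--             if ch == ',':
--                 if buf:
--                     out.append(buf)
--                 buf = ""
--                 pend = ""
--             elif ch.isspace():
--                 if buf:
--                     pend += ch
--             else:
--                 buf += pend + ch
--                 pend = ""
--         if buf:
--             out.append(buf)
--     return out
-- ===== Notes on version B (the rewrite author's own statement) =====
-- stated objective: alternative
-- what changed: Replaces A's split/strip/filter pipeline by a single character-level state machine: one pass over each name's characters with a token buffer and a pending-whitespace buffer, emitting the token at each comma or end of name; no str.split or str.strip is called.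
import Mathlib
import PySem

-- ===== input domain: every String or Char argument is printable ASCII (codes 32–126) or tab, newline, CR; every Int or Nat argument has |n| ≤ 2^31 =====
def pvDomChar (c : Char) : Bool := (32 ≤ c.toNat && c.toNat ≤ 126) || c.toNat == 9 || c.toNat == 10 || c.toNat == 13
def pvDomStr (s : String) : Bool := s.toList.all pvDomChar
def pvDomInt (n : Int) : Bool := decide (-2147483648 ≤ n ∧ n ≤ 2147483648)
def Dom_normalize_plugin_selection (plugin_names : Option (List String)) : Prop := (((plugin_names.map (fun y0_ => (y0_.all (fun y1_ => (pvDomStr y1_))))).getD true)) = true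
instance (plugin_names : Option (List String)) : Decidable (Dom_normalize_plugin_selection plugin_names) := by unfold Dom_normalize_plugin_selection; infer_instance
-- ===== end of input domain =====

-- B replaces A's split/strip/filter pipeline by a single character-level state machine
-- (token buffer + pending-whitespace buffer, flush at commas and at end of each name);
-- equal return value, no speed claim.

-- ===== PORT A =====
-- `s.split(",")` with the literal separator ","
def pySplitComma (s : String) : List String :=
  (PySem.Chars.splitOn s.toList [',']).map String.ofList

def normalize_plugin_selection (plugin_names : Option (List String)) : Option (List String) :=
  match plugin_names with
  | none => none
  | some names =>
    some (names.foldl (fun normalized plugin_name =>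
      (pySplitComma plugin_name).foldl (fun normalized token =>
        let stripped := PySem.Str.strip token
        if stripped ≠ "" then normalized ++ [stripped] else normalized) normalized) [])

-- ===== PORT B =====
-- the inner character loop of Source B: state = (out, buf, pend)
def pvScan (out : List String) (buf pend : List Char) : List Char → List String × List Char × List Char
  | [] => (out, buf, pend)
  | c :: rest =>
    if c = ',' then
      pvScan (if buf ≠ [] then out ++ [String.ofList buf] else out) [] [] rest
    else if PySem.Chars.isspace c then
      pvScan out buf (if buf ≠ [] then pend ++ [c] else pend) rest
    else
      pvScan out (buf ++ pend ++ [c]) [] rest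

def normalize_plugin_selection_alt (plugin_names : Option (List String)) : Option (List String) :=
  match plugin_names with
  | none => none
  | some names =>
    some (names.foldl (fun out name =>
      match pvScan out [] [] name.toList with
      | (out', buf, _pend) => if buf ≠ [] then out' ++ [String.ofList buf] else out') [])

-- ===== PRECONDITION & SPEC =====
def Spec_normalize_plugin_selection (plugin_names : Option (List String)) (out : Option (List String)) : Prop := out = normalize_plugin_selection_alt plugin_names
instance (plugin_names : Option (List String)) (out : Option (List String)) : Decidable (Spec_normalize_plugin_selection plugin_names out) := by unfold Spec_normalize_plugin_selection; infer_instance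

-- ===== CLAIM (what is proved, stated in full; the proofs are below) =====
def Claim_equal_normalize_plugin_selection : Prop := ∀ (plugin_names : Option (List String)), Dom_normalize_plugin_selection plugin_names → Spec_normalize_plugin_selection plugin_names (normalize_plugin_selection plugin_names)

-- ===== LEMMAS AND PROOFS =====

-- A's keep-if-nonempty-after-strip, as an Option
def pvKeep (token : String) : Option String :=
  let s := PySem.Str.strip token
  if s ≠ "" then some s else none

-- one non-comma character step of B's state machine, on the (buf, pend) part
def pvStep (s : List Char × List Char) (c : Char) : List Char × List Char :=
  if PySem.Chars.isspace c then (s.1, if s.1 ≠ [] then s.2 ++ [c] else s.2)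
  else (s.1 ++ s.2 ++ [c], [])

def pvProc (s : List Char × List Char) (t : List Char) : List Char × List Char := t.foldl pvStep s

def pvEmit (buf : List Char) : List String := if buf ≠ [] then [String.ofList buf] else []

-- what B's machine emits for one comma-free token, started fresh
def pvTokOut (t : List Char) : List String := pvEmit (pvProc ([], []) t).1

-- B's machine output for a token list whose FIRST token is entered with state s
def pvEmitFirst (s : List Char × List Char) (toks : List (List Char)) : List String :=
  match toks with
  | [] => pvEmit s.1
  | t :: ts => pvEmit (pvProc s t).1 ++ ts.flatMap pvTokOut

def pvFlush (x : List String × List Char × List Char) : List String := x.1 ++ pvEmit x.2.1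

theorem ofList_eq_empty_iff (l : List Char) : (String.ofList l = "") ↔ l = [] := by
  constructor
  · intro h; have := congrArg String.toList h; simpa using this
  · intro h; subst h; rfl

-- ---- PySem.Chars.splitOn [','] is List.splitOn ',' ----
def consHead (pre : List Char) : List (List Char) → List (List Char)
  | [] => [pre]
  | h :: t => (pre ++ h) :: t

theorem go_spec (l : List Char) : ∀ (fuel : Nat), l.length ≤ fuel → ∀ (cur : List Char) (acc : List (List Char)),
    PySem.Chars.splitOn.go [','] fuel l cur acc = acc.reverse ++ consHead cur.reverse (l.splitOn ',') := by
  induction l with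
  | nil =>
    intro fuel _ cur acc
    cases fuel <;> simp [PySem.Chars.splitOn.go, consHead, List.splitOn]
  | cons c rest ih =>
    intro fuel hf cur acc
    cases fuel with
    | zero => simp at hf
    | succ f =>
      rw [PySem.Chars.splitOn.go]
      have hrest : rest.length ≤ f := by simpa using hf
      by_cases hc : c = ','
      · subst hc
        have hpre : List.isPrefixOf [','] (','::rest) = true := by simp [List.isPrefixOf]
        rw [if_pos hpre]
        simp only [List.length_cons, List.drop_succ_cons, List.length_nil, List.drop_zero]
        rw [ih f hrest [] (cur.reverse :: acc)]
        simp [List.splitOn, List.splitOnP_cons, consHead]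
        rcases h : List.splitOnP (fun x => x == ',') rest with _ | ⟨p, ps⟩
        · exact absurd h (List.splitOnP_ne_nil _ _)
        · simp
      · have hpre : List.isPrefixOf [','] (c::rest) = false := by
          simp [List.isPrefixOf]; exact fun h => absurd h.symm hc
        rw [if_neg (by simp [hpre])]
        rw [ih f hrest (c :: cur) acc]
        have hne := List.splitOnP_ne_nil (fun x => x == ',') rest
        rcases h : rest.splitOn ',' with _ | ⟨p, ps⟩
        · exact absurd h hne
        · simp [List.splitOn, List.splitOnP_cons, hc]
          simp only [List.splitOn] at h
          rw [h]
          simp [consHead]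

theorem splitOn_comma (s : List Char) :
    PySem.Chars.splitOn s [','] = s.splitOn ',' := by
  rw [PySem.Chars.splitOn, go_spec s (s.length + 1) (by omega)]
  rcases h : s.splitOn ',' with _ | ⟨p, ps⟩
  · exact absurd h (List.splitOnP_ne_nil _ _)
  · simp [consHead]

-- ---- A's inner loop appends its kept strippings ----
theorem inner_foldl :
    ∀ (toks : List String) (acc : List String),
    toks.foldl (fun normalized token =>
        let stripped := PySem.Str.strip token
        if stripped ≠ "" then normalized ++ [stripped] else normalized) acc
      = acc ++ toks.filterMap pvKeep := by
  intro toks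
  induction toks with
  | nil => simp
  | cons t ts ih =>
    intro acc
    rw [List.foldl_cons, List.filterMap_cons]
    by_cases h : PySem.Str.strip t = ""
    · have hk : pvKeep t = none := by simp [pvKeep, h]
      have hacc : (let stripped := PySem.Str.strip t
          if stripped ≠ "" then acc ++ [stripped] else acc) = acc := by simp [h]
      rw [hk, hacc, ih]
    · have hk : pvKeep t = some (PySem.Str.strip t) := by simp [pvKeep, h]
      have hacc : (let stripped := PySem.Str.strip t
          if stripped ≠ "" then acc ++ [stripped] else acc) = acc ++ [PySem.Str.strip t] := by
        simp [h]
      rw [hk, hacc, ih]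
      simp

-- ---- rstrip under cons ----
theorem rstrip_cons_of_not_all (c : Char) (r : List Char) (h : ¬ r.all PySem.Chars.isspace) :
    PySem.Chars.rstrip (c :: r) = c :: PySem.Chars.rstrip r := by
  have hne : r.reverse.dropWhile PySem.Chars.isspace ≠ [] := by
    intro hnil
    exact h (by simpa [List.all_eq_true] using (List.dropWhile_eq_nil_iff.mp hnil))
  simp only [PySem.Chars.rstrip, List.reverse_cons, List.dropWhile_append]
  rw [if_neg (by simpa [List.isEmpty_iff] using hne)]
  simp

theorem rstrip_cons_of_all (c : Char) (hc : ¬ PySem.Chars.isspace c) (r : List Char)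
    (h : r.all PySem.Chars.isspace) :
    PySem.Chars.rstrip (c :: r) = [c] := by
  have hnil : r.reverse.dropWhile PySem.Chars.isspace = [] := by
    apply List.dropWhile_eq_nil_iff.mpr
    intro x hx
    exact (List.all_eq_true.mp h) x (by simpa using hx)
  simp only [PySem.Chars.rstrip, List.reverse_cons, List.dropWhile_append]
  rw [if_pos (by simp [hnil])]
  simp [hc]

-- ---- the machine on one comma-free token ----
theorem proc_of_ne_nil : ∀ (t : List Char) (buf pend : List Char), buf ≠ [] →
    (pvProc (buf, pend) t).1
      = buf ++ (if t.all PySem.Chars.isspace then [] else pend ++ PySem.Chars.rstrip t) := by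
  intro t
  induction t with
  | nil => intro buf pend h; simp [pvProc]
  | cons c r ih =>
    intro buf pend h
    by_cases hc : PySem.Chars.isspace c
    · have hstep : pvProc (buf, pend) (c :: r) = pvProc (buf, pend ++ [c]) r := by
        simp [pvProc, pvStep, hc, h]
      rw [hstep, ih buf (pend ++ [c]) h]
      have hall : (c :: r).all PySem.Chars.isspace = r.all PySem.Chars.isspace := by
        simp [hc]
      rw [hall]
      by_cases hr : r.all PySem.Chars.isspace
      · simp [hr]
      · rw [if_neg (by simpa using hr), if_neg (by simpa using hr),
            rstrip_cons_of_not_all c r (by simpa using hr)]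
        simp
    · have hstep : pvProc (buf, pend) (c :: r) = pvProc (buf ++ pend ++ [c], []) r := by
        simp [pvProc, pvStep, hc]
      rw [hstep, ih (buf ++ pend ++ [c]) [] (by simp)]
      have hall : (c :: r).all PySem.Chars.isspace = false := by
        simp [hc]
      rw [hall]
      by_cases hr : r.all PySem.Chars.isspace
      · rw [if_pos hr, rstrip_cons_of_all c hc r hr]; simp
      · rw [if_neg (by simpa using hr), rstrip_cons_of_not_all c r (by simpa using hr)]; simp

theorem proc_fresh : ∀ (t : List Char), (pvProc ([], []) t).1 = PySem.Chars.strip t := by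
  intro t
  induction t with
  | nil => simp [pvProc, PySem.Chars.strip, PySem.Chars.lstrip, PySem.Chars.rstrip]
  | cons c r ih =>
    by_cases hc : PySem.Chars.isspace c
    · have hstep : pvProc ([], []) (c :: r) = pvProc ([], []) r := by
        simp [pvProc, pvStep, hc]
      rw [hstep, ih]
      simp [PySem.Chars.strip, PySem.Chars.lstrip, hc]
    · have hstep : pvProc (([] : List Char), ([] : List Char)) (c :: r) = pvProc ([c], []) r := by
        simp [pvProc, pvStep, hc]
      rw [hstep, proc_of_ne_nil r [c] [] (by simp)]
      have hstrip : PySem.Chars.strip (c :: r) = PySem.Chars.rstrip (c :: r) := by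
        simp [PySem.Chars.strip, PySem.Chars.lstrip, hc]
      rw [hstrip]
      by_cases hr : r.all PySem.Chars.isspace
      · rw [if_pos hr, rstrip_cons_of_all c hc r hr]; simp
      · rw [if_neg (by simpa using hr), rstrip_cons_of_not_all c r (by simpa using hr)]; simp

theorem emitFirst_fresh (toks : List (List Char)) :
    pvEmitFirst ([], []) toks = toks.flatMap pvTokOut := by
  cases toks with
  | nil => simp [pvEmitFirst, pvEmit]
  | cons t ts => simp [pvEmitFirst, pvTokOut]

-- ---- the full inner loop versus splitting on ',' ----
theorem scan_spec : ∀ (l : List Char) (out : List String) (buf pend : List Char),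
    pvFlush (pvScan out buf pend l) = out ++ pvEmitFirst (buf, pend) (l.splitOn ',') := by
  intro l
  induction l with
  | nil =>
    intro out buf pend
    simp [pvScan, pvFlush, List.splitOn, pvEmitFirst, pvProc]
  | cons c r ih =>
    intro out buf pend
    by_cases hc : c = ','
    · subst hc
      have hsplit : (','::r).splitOn ',' = [] :: r.splitOn ',' := by
        simp [List.splitOn, List.splitOnP_cons]
      rw [hsplit]
      have hscan : pvScan out buf pend (','::r)
          = pvScan (if buf ≠ [] then out ++ [String.ofList buf] else out) [] [] r := by
        simp [pvScan]
      rw [hscan, ih, emitFirst_fresh]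
      have hout : (if buf ≠ [] then out ++ [String.ofList buf] else out) = out ++ pvEmit buf := by
        by_cases h : buf = [] <;> simp [pvEmit, h]
      rw [hout]
      simp [pvEmitFirst, pvProc]
    · rcases hsp : r.splitOn ',' with _ | ⟨t0, ts⟩
      · exact absurd hsp (List.splitOnP_ne_nil _ _)
      · have hsplit : (c::r).splitOn ',' = (c :: t0) :: ts := by
          simp [List.splitOn, List.splitOnP_cons, hc]
          simp only [List.splitOn] at hsp
          rw [hsp]
          simp
        rw [hsplit]
        have hscan : pvScan out buf pend (c::r)
            = pvScan out (pvStep (buf, pend) c).1 (pvStep (buf, pend) c).2 r := by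
          by_cases hs : PySem.Chars.isspace c
          · simp [pvScan, pvStep, hc, hs]
          · simp [pvScan, pvStep, hc, hs]
        rw [hscan, ih, hsp]
        simp only [pvEmitFirst, pvProc, List.foldl_cons]

-- B's per-name body in closed form
theorem body_eq (out : List String) (name : String) :
    (if (pvScan out [] [] name.toList).2.1 ≠ [] then
        (pvScan out [] [] name.toList).1 ++ [String.ofList (pvScan out [] [] name.toList).2.1]
      else (pvScan out [] [] name.toList).1)
    = out ++ (name.toList.splitOn ',').flatMap pvTokOut := by
  have h := scan_spec name.toList out [] []
  rw [emitFirst_fresh] at h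
  by_cases hb : (pvScan out [] [] name.toList).2.1 = []
  · rw [if_neg (by simp [hb])]
    simpa [pvFlush, pvEmit, hb] using h
  · rw [if_pos hb]
    simpa [pvFlush, pvEmit, hb] using h

-- one token: B's machine emits exactly what A keeps
theorem tok_eq (t : List Char) : pvTokOut t = (pvKeep (String.ofList t)).toList := by
  simp only [pvTokOut, proc_fresh, pvKeep, pvEmit]
  have hstrip : PySem.Str.strip (String.ofList t) = String.ofList (PySem.Chars.strip t) := by
    simp [PySem.Str.strip]
  rw [hstrip]
  by_cases h : PySem.Chars.strip t = []
  · rw [if_neg (by simp [h]), if_neg (by simp [(ofList_eq_empty_iff _).mpr h])]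
    simp
  · rw [if_pos (by simp [h]), if_pos (by simpa using fun he => h ((ofList_eq_empty_iff _).mp he))]
    simp

theorem tokens_eq (toks : List (List Char)) :
    toks.flatMap pvTokOut = (toks.map String.ofList).filterMap pvKeep := by
  induction toks with
  | nil => simp
  | cons t ts ih =>
    rw [List.map_cons, List.filterMap_cons, List.flatMap_cons, tok_eq, ih]
    cases pvKeep (String.ofList t) <;> simp

-- the two outer folds agree
theorem lists_eq (names : List String) :
    names.foldl (fun normalized plugin_name =>
      (pySplitComma plugin_name).foldl (fun normalized token =>
        let stripped := PySem.Str.strip token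
        if stripped ≠ "" then normalized ++ [stripped] else normalized) normalized) []
    = names.foldl (fun out name =>
      match pvScan out [] [] name.toList with
      | (out', buf, _pend) => if buf ≠ [] then out' ++ [String.ofList buf] else out') [] := by
  induction names using List.reverseRecOn with
  | nil => rfl
  | append_singleton ns n ih =>
    rw [List.foldl_append, List.foldl_append, ← ih]
    simp only [List.foldl_cons, List.foldl_nil]
    rw [inner_foldl, body_eq]
    congr 1
    rw [tokens_eq]
    unfold pySplitComma
    rw [splitOn_comma]

-- ===== VERDICT (by name: the statement is the Claim_ definition above) =====
theorem normalize_plugin_selection_spec : Claim_equal_normalize_plugin_selection := by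
  intro plugin_names _
  unfold Spec_normalize_plugin_selection
  unfold normalize_plugin_selection normalize_plugin_selection_alt
  cases plugin_names with
  | none => rfl
  | some names =>
    simp only
    rw [lists_eq]
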